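-- pv_equiv track=rewrite | github.com/bokong8119/Satanic_Yoke_core | 撒旦推杆（Satanic Yoke）核心解密程序.py | change_return
-- ===== SOURCE A (Python) =====
-- def change_return(answer,key):  #换位加密法反向解密
--     temp=['' for k in range(len(answer))]
--     for i in range(len(answer)):
--         index_temp=(i+key)%len(answer)
--         temp[index_temp]=answer[i]
--     output_temp=''
--     for st in temp:   #列表元素整合
--         output_temp+=st
--     return output_temp
-- ===== SOURCE B (Python) =====
-- def change_return(answer, key):  # same rotation via one slice-and-concat, no per-char loops
--     n = len(answer)
--     if n == 0:
--         return ''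
--     k = key % n
--     return answer[n - k:] + answer[:n - k]
-- ===== Notes on version B (the rewrite author's own statement) =====
-- stated objective: faster
-- what changed: Replaces the scatter-into-scratch-list index loop and the character-by-character string concatenation with a single slice-and-concatenate rotation answer[n-k:]+answer[:n-k] after an empty-string guard.
import Mathlib
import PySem

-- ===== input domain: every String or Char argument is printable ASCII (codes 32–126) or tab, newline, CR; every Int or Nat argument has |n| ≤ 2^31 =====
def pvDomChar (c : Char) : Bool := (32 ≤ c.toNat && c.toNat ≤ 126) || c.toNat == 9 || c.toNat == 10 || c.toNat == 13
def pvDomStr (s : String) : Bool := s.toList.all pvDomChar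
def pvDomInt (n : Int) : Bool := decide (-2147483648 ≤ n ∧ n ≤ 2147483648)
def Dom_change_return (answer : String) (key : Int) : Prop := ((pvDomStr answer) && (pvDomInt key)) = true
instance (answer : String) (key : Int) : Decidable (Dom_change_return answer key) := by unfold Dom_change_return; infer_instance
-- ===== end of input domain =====

-- B replaces the index-scatter loop and char-by-char concatenation by one slice-and-concat rotation (idiomatic).

-- ===== PORT A =====
def change_return (answer : String) (key : Int) : String :=
  let cs := answer.toList
  let n : Int := cs.length
  let temp : List (List Char) := (PySem.List.pyRange 0 n 1).map (fun _ => [])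
  let temp2 := (PySem.List.pyRange 0 n 1).foldl
      (fun t i => PySem.List.pySetD t (PySem.Int.mod (i + key) n) [PySem.List.pyGetD cs i ' ']) temp
  String.ofList (temp2.foldl (fun acc st => acc ++ st) [])

-- ===== PORT B =====
def change_return_alt (answer : String) (key : Int) : String :=
  let cs := answer.toList
  let n : Int := cs.length
  if n = 0 then ""
  else
    let k := PySem.Int.mod key n
    String.ofList (PySem.List.slice cs (some (n - k)) none ++ PySem.List.slice cs none (some (n - k)))

-- ===== PRECONDITION & SPEC =====
def Spec_change_return (answer : String) (key : Int) (out : String) : Prop := out = change_return_alt answer key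
instance (answer : String) (key : Int) (out : String) : Decidable (Spec_change_return answer key out) := by unfold Spec_change_return; infer_instance

-- ===== CLAIM (what is proved, stated in full; the proofs are below) =====
def Claim_equal_change_return : Prop := ∀ (answer : String) (key : Int), Dom_change_return answer key → Spec_change_return answer key (change_return answer key)

-- ===== LEMMAS AND PROOFS =====

theorem foldl_set_run {α : Type} (v : Nat → α) :
    ∀ (m p : Nat) (t : List α), p + m ≤ t.length →
    (List.range m).foldl (fun t' j => t'.set (p + j) (v j)) t
      = t.take p ++ (List.range m).map v ++ t.drop (p + m) := by
  intro m
  induction m with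
  | zero => intro p t h; simp [List.take_append_drop]
  | succ m ih =>
    intro p t h
    rw [List.range_succ, List.foldl_append, ih p t (by omega)]
    simp only [List.foldl_cons, List.foldl_nil]
    have hp : (t.take p).length = p := by simp; omega
    have hlen : ((t.take p) ++ (List.range m).map v).length = p + m := by simp; omega
    rw [List.append_assoc, List.set_append_right _ _ (by simp only [List.length_take]; omega)]
    have hd : t.drop (p + m) = t[p+m] :: t.drop (p + m + 1) := List.drop_eq_getElem_cons (by omega)
    rw [hp]
    have : (List.map v (List.range m) ++ t.drop (p + m)).set (p + m - p) (v m)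
         = List.map v (List.range m) ++ [v m] ++ t.drop (p + m + 1) := by
      rw [List.set_append_right _ _ (by simp only [List.length_map, List.length_range]; omega)]
      simp only [List.length_map, List.length_range]
      rw [hd]
      have : p + m - p - m = 0 := by omega
      rw [this, List.set_cons_zero, List.append_assoc]
      rfl
    rw [this, List.map_append]
    simp [List.append_assoc]
    omega

theorem map_getD_range {α : Type} [Inhabited α] (cs : List α) (p m : Nat) (x : α)
    (h : p + m ≤ cs.length) :
    (List.range m).map (fun j => cs.getD (p + j) x) = (cs.drop p).take m := by
  apply List.ext_getElem
  · simp; omega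
  · intro i h1 h2
    simp only [List.getElem_map, List.getElem_range, List.getElem_take, List.getElem_drop]
    rw [List.getD_eq_getElem]

theorem flatten_map_singleton {α : Type} (l : List α) : (l.map (fun c => [c])).flatten = l := by
  induction l with
  | nil => simp
  | cons a t ih => simp [ih]

theorem rotate_core (cs : List Char) (key : Int) (hne : cs ≠ []) :
    ((PySem.List.pyRange 0 (cs.length : Int) 1).foldl
        (fun t i => PySem.List.pySetD t (PySem.Int.mod (i + key) (cs.length : Int)) [PySem.List.pyGetD cs i ' '])
        ((PySem.List.pyRange 0 (cs.length : Int) 1).map (fun _ => ([] : List Char)))).foldl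
      (fun acc st => acc ++ st) []
    = PySem.List.slice cs (some ((cs.length : Int) - PySem.Int.mod key (cs.length : Int))) none
      ++ PySem.List.slice cs none (some ((cs.length : Int) - PySem.Int.mod key (cs.length : Int))) := by
  set N : Nat := cs.length with hN
  have hpos : 0 < N := by
    cases cs with
    | nil => exact absurd rfl hne
    | cons a l => simp [hN]
  have hNpos : (0:Int) < (N:Int) := by exact_mod_cast hpos
  have hmodkey : PySem.Int.mod key (N:Int) = key % (N:Int) := PySem.Int.mod_eq_emod_of_pos hNpos
  set K : Int := key % (N:Int) with hK
  have hK0 : 0 ≤ K := Int.emod_nonneg key (by omega)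
  have hKN : K < N := Int.emod_lt_of_pos key hNpos
  set kN : Nat := K.toNat with hkN
  have hkNN : kN < N := by omega
  set d : Nat := N - kN with hd
  -- B side
  have hdk : ((N:Int) - K) = (d:Int) := by omega
  rw [hmodkey, hdk, PySem.List.slice_from cs (by positivity),
      PySem.List.slice_to cs (by positivity)]
  simp only [Int.toNat_natCast]
  -- initial scratch list
  have hinit : (PySem.List.pyRange 0 (N:Int) 1).map (fun _ => ([] : List Char))
      = List.replicate N ([] : List Char) := by
    rw [List.map_const', PySem.List.length_pyRange_one]
    norm_num
  rw [hinit]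
  -- split the index range at d
  rw [PySem.List.pyRange_one_append 0 (d:Int) (N:Int) (by positivity) (by omega),
      List.foldl_append]
  -- first segment: writes cs[0..d) at positions kN..N)
  have hseg1 : (PySem.List.pyRange 0 (d:Int) 1).foldl
      (fun t i => PySem.List.pySetD t (PySem.Int.mod (i + key) (N:Int)) [PySem.List.pyGetD cs i ' '])
      (List.replicate N ([] : List Char))
      = List.replicate kN ([] : List Char) ++ (List.range d).map (fun j => [cs.getD j ' ']) := by
    have hdt : (((d:Int)) - 0).toNat = d := by omega
    rw [PySem.List.pyRange_one, hdt, List.foldl_map]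
    have hc : ∀ (t : List (List Char)), ∀ j ∈ List.range d,
        PySem.List.pySetD t (PySem.Int.mod (((0:Int) + (j:Nat)) + key) (N:Int)) [PySem.List.pyGetD cs ((0:Int) + (j:Nat)) ' ']
        = t.set (kN + j) [cs.getD j ' '] := by
      intro t j hj
      simp only [List.mem_range] at hj
      have hmod : PySem.Int.mod (((0:Int) + (j:Nat)) + key) (N:Int) = ((kN : Int) + (j:Int)) := by
        rw [PySem.Int.mod_eq_emod_of_pos hNpos]
        have hq := Int.mul_ediv_add_emod key (N:Int)
        have e1 : ((0:Int) + (j:Nat)) + key = (j:Int) + K + (N:Int) * (key / (N:Int)) := by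
          rw [hK]; omega
        rw [e1, Int.add_mul_emod_self_left, Int.emod_eq_of_lt (by omega) (by omega)]
        omega
      rw [hmod, PySem.List.pySetD_of_nonneg _ _ (by positivity)]
      have h0j : ((0:Int) + (j:Nat)) = ((j:Nat) : Int) := by omega
      rw [h0j, PySem.List.pyGetD_natCast]
      congr 1
    rw [PySem.List.foldl_congr_mem _ _ (fun t j => t.set (kN + j) [cs.getD j ' ']) _ hc]
    rw [foldl_set_run _ d kN (List.replicate N ([] : List Char)) (by simp; omega)]
    rw [List.take_replicate, List.drop_replicate]
    have h1 : min kN N = kN := by omega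
    have h2 : N - (kN + d) = 0 := by omega
    rw [h1, h2]
    simp
  rw [hseg1]
  set t1 : List (List Char) := List.replicate kN ([] : List Char) ++ (List.range d).map (fun j => [cs.getD j ' ']) with ht1
  have ht1len : t1.length = N := by simp [ht1]; omega
  have hseg2 : (PySem.List.pyRange (d:Int) (N:Int) 1).foldl
      (fun t i => PySem.List.pySetD t (PySem.Int.mod (i + key) (N:Int)) [PySem.List.pyGetD cs i ' '])
      t1
      = (List.range kN).map (fun j => [cs.getD (d + j) ' ']) ++ (List.range d).map (fun j => [cs.getD j ' ']) := by
    have hdt : (((N:Int)) - (d:Int)).toNat = kN := by omega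
    rw [PySem.List.pyRange_one, hdt, List.foldl_map]
    have hc : ∀ (t : List (List Char)), ∀ j ∈ List.range kN,
        PySem.List.pySetD t (PySem.Int.mod (((d:Int) + (j:Nat)) + key) (N:Int)) [PySem.List.pyGetD cs ((d:Int) + (j:Nat)) ' ']
        = t.set (0 + j) [cs.getD (d + j) ' '] := by
      intro t j hj
      simp only [List.mem_range] at hj
      have hmod : PySem.Int.mod (((d:Int) + (j:Nat)) + key) (N:Int) = ((j:Nat) : Int) := by
        rw [PySem.Int.mod_eq_emod_of_pos hNpos]
        have hq := Int.mul_ediv_add_emod key (N:Int)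
        have e1 : ((d:Int) + (j:Nat)) + key = (j:Int) + (N:Int) * (key / (N:Int) + 1) := by
          rw [mul_add]; omega
        rw [e1, Int.add_mul_emod_self_left, Int.emod_eq_of_lt (by omega) (by omega)]
      rw [hmod, PySem.List.pySetD_of_nonneg _ _ (by positivity)]
      have hdj : ((d:Int) + (j:Nat)) = (((d + j : Nat)) : Int) := by omega
      rw [hdj, PySem.List.pyGetD_natCast]
      congr 1
      omega
    rw [PySem.List.foldl_congr_mem _ _ (fun t j => t.set (0 + j) [cs.getD (d + j) ' ']) _ hc]
    rw [foldl_set_run _ kN 0 t1 (by omega)]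
    rw [List.take_zero, List.nil_append, ht1]
    rw [List.drop_left' (by simp)]
  rw [hseg2, PySem.List.foldl_append_eq_flatten, List.nil_append, List.flatten_append]
  have hV2 : ((List.range kN).map (fun j => [cs.getD (d + j) ' '])).flatten = cs.drop d := by
    have : (List.range kN).map (fun j => [cs.getD (d + j) ' '])
        = ((List.range kN).map (fun j => cs.getD (d + j) ' ')).map (fun c => [c]) := by
      rw [List.map_map]; rfl
    rw [this, map_getD_range cs d kN ' ' (by omega)]
    rw [List.take_of_length_le (by simp; omega)]
    exact flatten_map_singleton _
  have hV1 : ((List.range d).map (fun j => [cs.getD j ' '])).flatten = cs.take d := by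
    have : (List.range d).map (fun j => [cs.getD j ' '])
        = ((List.range d).map (fun j => cs.getD (0 + j) ' ')).map (fun c => [c]) := by
      rw [List.map_map]; simp
    rw [this, map_getD_range cs 0 d ' ' (by omega), List.drop_zero]
    exact flatten_map_singleton _
  rw [hV2, hV1]


-- ===== VERDICT (by name: the statement is the Claim_ definition above) =====
theorem change_return_spec : Claim_equal_change_return := by
  intro answer key _
  unfold Spec_change_return
  simp only [change_return, change_return_alt]
  by_cases h : answer.toList = []
  · simp [h]
  · have hlen : ((answer.toList.length : Int)) ≠ 0 := by
      cases hcl : answer.toList with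
      | nil => exact absurd hcl h
      | cons a t => simp; omega
    rw [if_neg hlen]
    exact congrArg String.ofList (rotate_core answer.toList key h)
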